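-- pv_equiv track=rewrite | github.com/darthsuogles/phissenschaft | algo/leetcode_373.py | kSmallestTuples
-- ===== SOURCE A (Python) =====
-- import heapq
--
-- def kSmallestTuples(nums_list, k):
--
--     def k_small_kern(nums_list, k):
--         nums_list = [v for v in nums_list if v]
--         if not nums_list: return []
--         n = len(nums_list)
--
--         if 1 == n:  # one list only, return top-k
--             return [[u, u] for u in nums_list[0][:k]]
--
--         ax = nums_list[0]
--         bx = k_small_kern(nums_list[1:], k)
--         hpq = []
--         res = []
--         m = len(ax); n = len(bx)
--         def push(i, j):
--             if not (i < m and j < n): return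
--             el = [ax[i] + bx[j][0]] + [(i, j)] + [ax[i]] + bx[j][1:]
--             heapq.heappush(hpq, el)
--
--         def pop():
--             if not hpq: return None
--             el = heapq.heappop(hpq)
--             i, j = el[1]
--             vals = el[2:]
--             v_sum = el[0]
--             return i, j, v_sum, vals
--
--         push(0, 0)
--         while hpq and len(res) < k:
--             i, j, v_sum, vals = pop()
--             res.append([v_sum] + vals)
--             if j + 1 < n:
--                 push(i, j + 1)
--             if 0 == j:
--                 if i + 1 < m:
--                     push(i + 1, 0)
--
--         return res
--
--     return [v[1:] for v in k_small_kern(nums_list, k)]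
-- ===== SOURCE B (Python) =====
-- def _merge(ax, bx, k):
--     # merge one list with an accumulator of partial tuples, keeping k smallest;
--     # frontier kept as an explicitly sorted list, pop = head
--     m, n = len(ax), len(bx)
--     frontier = []
--     def push(i, j):
--         if i < m and j < n:
--             el = [ax[i] + bx[j][0], (i, j), ax[i]] + bx[j][1:]
--             pos = 0
--             while pos < len(frontier) and frontier[pos] < el:
--                 pos += 1
--             frontier.insert(pos, el)
--     push(0, 0)
--     res = []
--     while frontier and len(res) < k:
--         el = frontier.pop(0)
--         i, j = el[1]
--         res.append([el[0]] + el[2:])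
--         if j + 1 < n:
--             push(i, j + 1)
--         if j == 0 and i + 1 < m:
--             push(i + 1, 0)
--     return res
--
-- def kSmallestTuples(nums_list, k):
--     lists = [v for v in nums_list if v]
--     if not lists:
--         return []
--     acc = [[u, u] for u in lists[-1][:k]]
--     for ax in reversed(lists[:-1]):
--         acc = _merge(ax, acc, k)
--     return [v[1:] for v in acc]
-- ===== Notes on version B (the rewrite author's own statement) =====
-- stated objective: alternative
-- what changed: B replaces A's recursive kernel over the list of lists by one upfront empty-filter plus an iterative right-to-left fold, and replaces the heapq frontier by an explicitly sorted list (insert in order, pop the head) instead of a heap popped by minimum-scan.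
import Mathlib
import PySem

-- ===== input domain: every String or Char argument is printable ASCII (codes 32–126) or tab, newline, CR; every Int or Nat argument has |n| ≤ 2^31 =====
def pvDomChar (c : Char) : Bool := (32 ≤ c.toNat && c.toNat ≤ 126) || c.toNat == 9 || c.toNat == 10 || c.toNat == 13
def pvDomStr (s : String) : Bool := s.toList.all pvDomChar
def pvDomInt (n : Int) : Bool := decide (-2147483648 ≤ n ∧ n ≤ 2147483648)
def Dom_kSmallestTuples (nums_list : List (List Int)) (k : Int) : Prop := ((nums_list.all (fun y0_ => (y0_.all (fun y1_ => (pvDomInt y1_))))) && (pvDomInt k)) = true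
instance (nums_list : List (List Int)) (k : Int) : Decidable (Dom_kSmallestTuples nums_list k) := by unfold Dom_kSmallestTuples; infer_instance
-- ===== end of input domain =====

-- B replaces A's outer recursion over the list of lists by a single upfront filter and a
-- right fold, and replaces the heapq frontier by an explicitly sorted list (pop = head);
-- objective: alternative decomposition, same cost.

-- Heap element: (sum, (i, j), values) — Python's [sum, (i,j), v0, v1, …]
abbrev pvE := Int × (Nat × Nat) × List Int

-- Python's lexicographic comparison of int lists (used as the tail of the element order)
def pvLexLt : List Int → List Int → Bool
  | [], [] => false
  | [], _ :: _ => true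
  | _ :: _, [] => false
  | a :: as, b :: bs => decide (a < b) || (a == b && pvLexLt as bs)

-- Python's `<` on the heap elements [sum, (i,j), vals…] (lexicographic)
def pvLtE : pvE → pvE → Bool
  | (s1, (i1, j1), v1), (s2, (i2, j2), v2) =>
    decide (s1 < s2) || (s1 == s2 &&
      (decide (i1 < i2) || (i1 == i2 &&
        (decide (j1 < j2) || (j1 == j2 && pvLexLt v1 v2)))))

-- el = [ax[i] + bx[j][0], (i,j), ax[i]] + bx[j][1:]   (both Pythons build exactly this)
def pvMkEl (ax : List Int) (bx : List (List Int)) (i j : Nat) : pvE :=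
  (ax.getD i 0 + (bx.getD j []).headD 0, (i, j), ax.getD i 0 :: (bx.getD j []).tail)

-- [[u, u] for u in l[:k]]   (the single-list base, identical in both Pythons)
def pvBaseK (l : List Int) (k : Int) : List (List Int) :=
  (PySem.List.slice l none (some k)).map (fun u => [u, u])

-- ===== PORT A =====

-- push(i, j): guard, then heappush; the heap is modelled as the bag of pushed elements
def pvPushA (ax : List Int) (bx : List (List Int)) (h : List pvE) (i j : Nat) : List pvE :=
  if i < ax.length ∧ j < bx.length then h ++ [pvMkEl ax bx i j] else h

-- heappop's choice: the minimum element under pvLtE (elements are totally ordered)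
def pvMinScan (x : pvE) : List pvE → pvE
  | [] => x
  | y :: ys => pvMinScan (if pvLtE y x then y else x) ys

-- after a pop of (i, j): `if j+1 < n: push(i, j+1)` then `if 0 == j and i+1 < m: push(i+1, 0)`
def pvAfterA (ax : List Int) (bx : List (List Int)) (h : List pvE) (i j : Nat) : List pvE :=
  if j = 0 ∧ i + 1 < ax.length then
    pvPushA ax bx (if j + 1 < bx.length then pvPushA ax bx h i (j + 1) else h) (i + 1) 0
  else (if j + 1 < bx.length then pvPushA ax bx h i (j + 1) else h)

-- `while hpq and len(res) < k:` — each iteration appends one result, so k.toNat fuel suffices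
def pvLoopA (ax : List Int) (bx : List (List Int)) (k : Int) : Nat → List pvE → List (List Int) → List (List Int)
  | 0, _, res => res
  | _ + 1, [], res => res
  | f + 1, x :: xs, res =>
    if (res.length : Int) < k then
      pvLoopA ax bx k f
        (pvAfterA ax bx ((x :: xs).erase (pvMinScan x xs)) (pvMinScan x xs).2.1.1 (pvMinScan x xs).2.1.2)
        (res ++ [(pvMinScan x xs).1 :: (pvMinScan x xs).2.2])
    else res

-- the two-list merge of A's kernel (the n ≥ 2 branch body)
def pvMergeA (ax : List Int) (bx : List (List Int)) (k : Int) : List (List Int) :=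
  pvLoopA ax bx k k.toNat (pvPushA ax bx [] 0 0) []

-- k_small_kern: filter empties, base cases, recurse on the tail of the filtered list
def pvKernA (nums_list : List (List Int)) (k : Int) : List (List Int) :=
  match h : nums_list.filter (fun v => !v.isEmpty) with
  | [] => []
  | [l] => pvBaseK l k
  | ax :: b :: rest => pvMergeA ax (pvKernA (b :: rest) k) k
termination_by nums_list.length
decreasing_by
  have h1 : (nums_list.filter (fun v => !v.isEmpty)).length ≤ nums_list.length :=
    List.length_filter_le _ _
  rw [h] at h1
  simp only [List.length_cons] at h1 ⊢
  omega

def kSmallestTuples (nums_list : List (List Int)) (k : Int) : List (List Int) :=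
  (pvKernA nums_list k).map (fun v => PySem.List.slice v (some 1) none)

-- ===== PORT B =====

-- the frontier is kept sorted: scan past the strictly smaller prefix, insert there
def pvInsSorted (e : pvE) : List pvE → List pvE
  | [] => [e]
  | x :: xs => if pvLtE x e then x :: pvInsSorted e xs else e :: x :: xs

def pvPushB (ax : List Int) (bx : List (List Int)) (h : List pvE) (i j : Nat) : List pvE :=
  if i < ax.length ∧ j < bx.length then pvInsSorted (pvMkEl ax bx i j) h else h

def pvAfterB (ax : List Int) (bx : List (List Int)) (h : List pvE) (i j : Nat) : List pvE :=
  if j = 0 ∧ i + 1 < ax.length then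
    pvPushB ax bx (if j + 1 < bx.length then pvPushB ax bx h i (j + 1) else h) (i + 1) 0
  else (if j + 1 < bx.length then pvPushB ax bx h i (j + 1) else h)

-- `while frontier and len(res) < k:` — pop = frontier.pop(0), the head of the sorted list
def pvLoopB (ax : List Int) (bx : List (List Int)) (k : Int) : Nat → List pvE → List (List Int) → List (List Int)
  | 0, _, res => res
  | _ + 1, [], res => res
  | f + 1, e :: t, res =>
    if (res.length : Int) < k then
      pvLoopB ax bx k f (pvAfterB ax bx t e.2.1.1 e.2.1.2) (res ++ [e.1 :: e.2.2])
    else res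

def pvMergeB (ax : List Int) (bx : List (List Int)) (k : Int) : List (List Int) :=
  pvLoopB ax bx k k.toNat (pvPushB ax bx [] 0 0) []

def kSmallestTuples_alt (nums_list : List (List Int)) (k : Int) : List (List Int) :=
  if (nums_list.filter (fun v => !v.isEmpty)).isEmpty then []
  else
    (((nums_list.filter (fun v => !v.isEmpty)).dropLast.foldr
        (fun ax acc => pvMergeB ax acc k)
        (pvBaseK ((nums_list.filter (fun v => !v.isEmpty)).getLastD []) k)).map
      (fun v => PySem.List.slice v (some 1) none))

-- ===== PRECONDITION & SPEC =====
def Spec_kSmallestTuples (nums_list : List (List Int)) (k : Int) (out : List (List Int)) : Prop := out = kSmallestTuples_alt nums_list k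
instance (nums_list : List (List Int)) (k : Int) (out : List (List Int)) : Decidable (Spec_kSmallestTuples nums_list k out) := by unfold Spec_kSmallestTuples; infer_instance

-- ===== CLAIM (what is proved, stated in full; the proofs are below) =====
def Claim_equal_kSmallestTuples : Prop := ∀ (nums_list : List (List Int)) (k : Int), Dom_kSmallestTuples nums_list k → Spec_kSmallestTuples nums_list k (kSmallestTuples nums_list k)

-- ===== LEMMAS AND PROOFS =====

theorem pvLexLt_irrefl (l : List Int) : pvLexLt l l = false := by
  induction l with
  | nil => rfl
  | cons a as ih => simp [pvLexLt, ih]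

theorem pvLexLt_asymm : ∀ a b : List Int, pvLexLt a b = true → pvLexLt b a = false := by
  intro a
  induction a with
  | nil => intro b h; cases b <;> simp [pvLexLt] at h ⊢
  | cons x xs ih =>
    intro b h
    cases b with
    | nil => simp [pvLexLt] at h
    | cons y ys =>
      simp only [pvLexLt, Bool.or_eq_true, Bool.and_eq_true, decide_eq_true_eq, beq_iff_eq] at h ⊢
      simp only [Bool.or_eq_false_iff, Bool.and_eq_false_iff, decide_eq_false_iff_not, beq_eq_false_iff_ne]
      rcases h with h | ⟨rfl, h⟩
      · constructor
        · omega
        · left; omega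
      · exact ⟨by omega, Or.inr (by simpa using ih ys h)⟩

theorem pvLexLt_connex : ∀ a b : List Int, pvLexLt a b = false → pvLexLt b a = false → a = b := by
  intro a
  induction a with
  | nil => intro b h1 _; cases b with
    | nil => rfl
    | cons y ys => simp [pvLexLt] at h1
  | cons x xs ih =>
    intro b h1 h2
    cases b with
    | nil => simp [pvLexLt] at h2
    | cons y ys =>
      simp only [pvLexLt, Bool.or_eq_false_iff, Bool.and_eq_false_iff,
        decide_eq_false_iff_not, beq_eq_false_iff_ne] at h1 h2
      obtain ⟨hx, h1'⟩ := h1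
      obtain ⟨hy, h2'⟩ := h2
      have hxy : x = y := by omega
      subst hxy
      rcases h1' with h | h
      · exact absurd rfl h
      · rcases h2' with h' | h'
        · exact absurd rfl h'
        · rw [ih ys h h']

theorem pvLexLt_trans : ∀ a b c : List Int, pvLexLt a b = true → pvLexLt b c = true → pvLexLt a c = true := by
  intro a
  induction a with
  | nil => intro b c h1 h2; cases b <;> cases c <;> simp_all [pvLexLt]
  | cons x xs ih =>
    intro b c h1 h2
    cases b with
    | nil => simp [pvLexLt] at h1
    | cons y ys =>
      cases c with
      | nil => simp [pvLexLt] at h2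
      | cons z zs =>
        simp only [pvLexLt, Bool.or_eq_true, Bool.and_eq_true, decide_eq_true_eq, beq_iff_eq] at h1 h2 ⊢
        rcases h1 with h1 | ⟨rfl, h1⟩
        · rcases h2 with h2 | ⟨rfl, h2⟩
          · left; omega
          · left; exact h1
        · rcases h2 with h2 | ⟨rfl, h2⟩
          · left; exact h2
          · exact Or.inr ⟨rfl, ih ys zs h1 h2⟩

theorem pvLtE_iff (s1 s2 : Int) (i1 j1 i2 j2 : Nat) (v1 v2 : List Int) :
    pvLtE (s1, (i1, j1), v1) (s2, (i2, j2), v2) = true ↔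
      (s1 < s2 ∨ (s1 = s2 ∧ (i1 < i2 ∨ (i1 = i2 ∧ (j1 < j2 ∨ (j1 = j2 ∧ pvLexLt v1 v2 = true)))))) := by
  simp [pvLtE]

theorem pvLtE_irrefl (e : pvE) : pvLtE e e = false := by
  obtain ⟨s, ⟨i, j⟩, v⟩ := e
  simp [pvLtE, pvLexLt_irrefl]

theorem pvLtE_asymm (a b : pvE) (h : pvLtE a b = true) : pvLtE b a = false := by
  obtain ⟨s1, ⟨i1, j1⟩, v1⟩ := a
  obtain ⟨s2, ⟨i2, j2⟩, v2⟩ := b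
  rw [pvLtE_iff] at h
  rw [Bool.eq_false_iff]
  intro hc
  rw [pvLtE_iff] at hc
  rcases h with h | ⟨rfl, h⟩ <;> rcases hc with hc | ⟨he, hc⟩
  · omega
  · omega
  · omega
  · rcases h with h | ⟨rfl, h⟩ <;> rcases hc with hc | ⟨hi, hc⟩
    · omega
    · omega
    · omega
    · rcases h with h | ⟨rfl, h⟩ <;> rcases hc with hc | ⟨hj, hc⟩
      · omega
      · omega
      · omega
      · exact absurd hc (by simpa using pvLexLt_asymm _ _ h)

theorem pvLtE_connex (a b : pvE) (h1 : pvLtE a b = false) (h2 : pvLtE b a = false) : a = b := by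
  obtain ⟨s1, ⟨i1, j1⟩, v1⟩ := a
  obtain ⟨s2, ⟨i2, j2⟩, v2⟩ := b
  rw [Bool.eq_false_iff] at h1 h2
  simp only [ne_eq, pvLtE_iff] at h1 h2
  push_neg at h1 h2
  obtain ⟨ha1, hb1⟩ := h1
  obtain ⟨ha2, hb2⟩ := h2
  have hs : s1 = s2 := by omega
  subst hs
  obtain ⟨hc1, hd1⟩ := hb1 rfl
  obtain ⟨hc2, hd2⟩ := hb2 rfl
  have hi : i1 = i2 := by omega
  subst hi
  obtain ⟨he1, hf1⟩ := hd1 rfl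
  obtain ⟨he2, hf2⟩ := hd2 rfl
  have hj : j1 = j2 := by omega
  subst hj
  rw [pvLexLt_connex v1 v2 (Bool.eq_false_iff.mpr (hf1 rfl)) (Bool.eq_false_iff.mpr (hf2 rfl))]

theorem pvLtE_trans (a b c : pvE) (h1 : pvLtE a b = true) (h2 : pvLtE b c = true) : pvLtE a c = true := by
  obtain ⟨s1, ⟨i1, j1⟩, v1⟩ := a
  obtain ⟨s2, ⟨i2, j2⟩, v2⟩ := b
  obtain ⟨s3, ⟨i3, j3⟩, v3⟩ := c
  rw [pvLtE_iff] at h1 h2 ⊢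
  rcases h1 with h1 | ⟨rfl, h1⟩ <;> rcases h2 with h2 | ⟨rfl, h2⟩
  · left; omega
  · left; exact h1
  · left; exact h2
  · refine Or.inr ⟨rfl, ?_⟩
    rcases h1 with h1 | ⟨rfl, h1⟩ <;> rcases h2 with h2 | ⟨rfl, h2⟩
    · left; omega
    · left; exact h1
    · left; exact h2
    · refine Or.inr ⟨rfl, ?_⟩
      rcases h1 with h1 | ⟨rfl, h1⟩ <;> rcases h2 with h2 | ⟨rfl, h2⟩
      · left; omega
      · left; exact h1
      · left; exact h2
      · exact Or.inr ⟨rfl, pvLexLt_trans _ _ _ h1 h2⟩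

-- sortedness of the B frontier
def pvSorted (l : List pvE) : Prop := l.Pairwise (fun a b => pvLtE b a = false)

theorem pvMinScan_mem (xs : List pvE) : ∀ x, pvMinScan x xs = x ∨ pvMinScan x xs ∈ xs := by
  induction xs with
  | nil => intro x; exact Or.inl rfl
  | cons y ys ih =>
    intro x
    rw [pvMinScan]
    rcases ih (if pvLtE y x then y else x) with h | h
    · rw [h]; split
      · exact Or.inr List.mem_cons_self
      · exact Or.inl rfl
    · exact Or.inr (List.mem_cons_of_mem _ h)

theorem pvMinScan_min (xs : List pvE) : ∀ x y, (y = x ∨ y ∈ xs) → pvLtE y (pvMinScan x xs) = false := by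
  induction xs with
  | nil =>
    intro x y hy
    rcases hy with rfl | h
    · exact pvLtE_irrefl y
    · simp at h
  | cons z zs ih =>
    intro x y hy
    rw [pvMinScan]
    by_cases hzx : pvLtE z x = true
    · simp only [hzx, if_true]
      rcases hy with rfl | hy
      · have hz := ih z z (Or.inl rfl)
        rw [Bool.eq_false_iff]; intro hc
        exact absurd (pvLtE_trans _ _ _ hzx hc) (by simp [hz])
      · rcases List.mem_cons.mp hy with rfl | hy
        · exact ih y y (Or.inl rfl)
        · exact ih z y (Or.inr hy)
    · simp only [hzx, if_false]
      rcases hy with rfl | hy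
      · exact ih y y (Or.inl rfl)
      · rcases List.mem_cons.mp hy with rfl | hy
        · have hx := ih x x (Or.inl rfl)
          rw [Bool.eq_false_iff]; intro hc
          by_cases hxy : pvLtE x y = true
          · exact absurd (pvLtE_trans _ _ _ hxy hc) (by simp [hx])
          · have : x = y := pvLtE_connex x y (Bool.not_eq_true _ ▸ hxy)
              (Bool.not_eq_true _ ▸ hzx)
            subst this
            exact absurd hc (by simp [hx])
        · exact ih x y (Or.inr hy)

theorem pvInsSorted_perm (e : pvE) (l : List pvE) : List.Perm (pvInsSorted e l) (e :: l) := by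
  induction l with
  | nil => exact List.Perm.refl _
  | cons x xs ih =>
    rw [pvInsSorted]
    split
    · exact (ih.cons x).trans (List.Perm.swap _ _ _)
    · exact List.Perm.refl _

theorem pvInsSorted_sorted (e : pvE) (l : List pvE) (h : pvSorted l) : pvSorted (pvInsSorted e l) := by
  induction l with
  | nil => simp [pvInsSorted, pvSorted]
  | cons x xs ih =>
    rw [pvInsSorted]
    rcases List.pairwise_cons.mp h with ⟨hx, hxs⟩
    split
    · rename_i hlt
      refine List.pairwise_cons.mpr ⟨?_, ih hxs⟩
      intro y hy
      rcases List.mem_cons.mp ((pvInsSorted_perm e xs).mem_iff.mp hy) with rfl | hy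
      · exact pvLtE_asymm _ _ hlt
      · exact hx y hy
    · rename_i hlt
      refine List.pairwise_cons.mpr ⟨?_, h⟩
      intro y hy
      rcases List.mem_cons.mp hy with rfl | hy
      · exact Bool.not_eq_true _ ▸ hlt
      · rw [Bool.eq_false_iff]; intro hc
        by_cases hex : pvLtE e x = true
        · exact absurd (pvLtE_trans _ _ _ hc hex) (by simpa using hx y hy)
        · have : x = e := pvLtE_connex x e (Bool.not_eq_true _ ▸ hlt) (Bool.not_eq_true _ ▸ hex)
          subst this
          exact absurd hc (by simpa using hx y hy)

theorem pvPush_perm (ax : List Int) (bx : List (List Int)) (h h' : List pvE) (i j : Nat)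
    (hp : List.Perm h h') : List.Perm (pvPushA ax bx h i j) (pvPushB ax bx h' i j) := by
  unfold pvPushA pvPushB
  split
  · exact (List.perm_append_singleton _ _).trans ((hp.cons _).trans (pvInsSorted_perm _ _).symm)
  · exact hp

theorem pvPushB_sorted (ax : List Int) (bx : List (List Int)) (h : List pvE) (i j : Nat)
    (hs : pvSorted h) : pvSorted (pvPushB ax bx h i j) := by
  unfold pvPushB
  split
  · exact pvInsSorted_sorted _ _ hs
  · exact hs

theorem pvAfter_perm (ax : List Int) (bx : List (List Int)) (h h' : List pvE) (i j : Nat)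
    (hp : List.Perm h h') : List.Perm (pvAfterA ax bx h i j) (pvAfterB ax bx h' i j) := by
  unfold pvAfterA pvAfterB
  split
  · apply pvPush_perm
    split
    · exact pvPush_perm _ _ _ _ _ _ hp
    · exact hp
  · split
    · exact pvPush_perm _ _ _ _ _ _ hp
    · exact hp

theorem pvAfterB_sorted (ax : List Int) (bx : List (List Int)) (h : List pvE) (i j : Nat)
    (hs : pvSorted h) : pvSorted (pvAfterB ax bx h i j) := by
  unfold pvAfterB
  split
  · apply pvPushB_sorted
    split
    · exact pvPushB_sorted _ _ _ _ _ hs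
    · exact hs
  · split
    · exact pvPushB_sorted _ _ _ _ _ hs
    · exact hs

-- the scanned minimum of A's bag equals the head of B's sorted frontier
theorem pvMinScan_eq_head (x : pvE) (xs : List pvE) (e : pvE) (t : List pvE)
    (hp : List.Perm (x :: xs) (e :: t)) (hs : pvSorted (e :: t)) : pvMinScan x xs = e := by
  have hmem : pvMinScan x xs ∈ e :: t := by
    refine hp.mem_iff.mp ?_
    rcases pvMinScan_mem xs x with h | h
    · rw [h]; exact List.mem_cons_self
    · exact List.mem_cons_of_mem _ h
  have hemem : e ∈ x :: xs := hp.symm.mem_iff.mp List.mem_cons_self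
  have h1 : pvLtE e (pvMinScan x xs) = false := by
    rcases List.mem_cons.mp hemem with h | h
    · exact pvMinScan_min xs x e (Or.inl h)
    · exact pvMinScan_min xs x e (Or.inr h)
  have h2 : pvLtE (pvMinScan x xs) e = false := by
    rcases List.mem_cons.mp hmem with h | h
    · rw [h]; exact pvLtE_irrefl e
    · exact (List.pairwise_cons.mp hs).1 _ h
  exact pvLtE_connex _ _ h2 h1

theorem pvLoop_eq (ax : List Int) (bx : List (List Int)) (k : Int) :
    ∀ (f : Nat) (hA hB : List pvE) (res : List (List Int)),
      List.Perm hA hB → pvSorted hB → pvLoopA ax bx k f hA res = pvLoopB ax bx k f hB res := by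
  intro f
  induction f with
  | zero => intro hA hB res _ _; rfl
  | succ f ih =>
    intro hA hB res hp hs
    cases hB with
    | nil =>
      have : hA = [] := List.Perm.eq_nil hp
      subst this; rfl
    | cons e t =>
      cases hA with
      | nil => exact absurd (List.Perm.eq_nil hp.symm) (by simp)
      | cons x xs =>
        rw [pvLoopA, pvLoopB]
        by_cases hk : (res.length : Int) < k
        · simp only [hk, if_true]
          have hmin : pvMinScan x xs = e := pvMinScan_eq_head x xs e t hp hs
          rw [hmin]
          have hperase : List.Perm ((x :: xs).erase e) t := by
            have := hp.erase e
            rwa [List.erase_cons_head] at this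
          exact ih _ _ _ (pvAfter_perm ax bx _ _ _ _ hperase)
            (pvAfterB_sorted ax bx _ _ _ (List.Pairwise.of_cons hs))
        · simp only [hk, if_false]
  
theorem pvMerge_eq (ax : List Int) (bx : List (List Int)) (k : Int) :
    pvMergeA ax bx k = pvMergeB ax bx k := by
  unfold pvMergeA pvMergeB
  exact pvLoop_eq ax bx k _ _ _ _
    (pvPush_perm ax bx [] [] 0 0 (List.Perm.refl _))
    (pvPushB_sorted ax bx [] 0 0 (by simp [pvSorted]))

-- filtering is idempotent, so A's per-level refilter is the identity below the top level
theorem pvFilter_self (ls : List (List Int)) (h : ∀ v ∈ ls, v.isEmpty = false) :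
    ls.filter (fun v => !v.isEmpty) = ls :=
  List.filter_eq_self.mpr (fun v hv => by simp [h v hv])

-- A's kernel on an all-nonempty, nonempty list is the right fold of B
theorem pvKernA_eq_fold (k : Int) : ∀ ls : List (List Int), ls ≠ [] →
    (∀ v ∈ ls, v.isEmpty = false) →
    pvKernA ls k = ls.dropLast.foldr (fun ax acc => pvMergeB ax acc k) (pvBaseK (ls.getLastD []) k) := by
  intro ls
  induction ls with
  | nil => intro h; exact absurd rfl h
  | cons a rest ih =>
    intro _ hne
    have hfil : (a :: rest).filter (fun v => !v.isEmpty) = a :: rest := pvFilter_self _ hne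
    rw [pvKernA.eq_def]
    split
    · rename_i heq; rw [hfil] at heq; exact absurd heq (by simp)
    · rename_i l heq; rw [hfil] at heq
      obtain ⟨rfl, hrest⟩ := List.cons_eq_cons.mp heq
      subst hrest
      simp
    · rename_i ax b rs heq; rw [hfil] at heq
      obtain ⟨rfl, hrest⟩ := List.cons_eq_cons.mp heq
      rw [← hrest]
      have hrs : rest ≠ [] := by rw [hrest]; simp
      have hne' : ∀ v ∈ rest, v.isEmpty = false := fun v hv => hne v (List.mem_cons_of_mem _ hv)
      rw [ih hrs hne', pvMerge_eq]
      cases rest with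
      | nil => exact absurd rfl hrs
      | cons c cs => simp

-- pvKernA only reads its argument through the filter, so pre-filtering is invisible to it
theorem pvKernA_filter (nl : List (List Int)) (k : Int) :
    pvKernA nl k = pvKernA (nl.filter (fun v => !v.isEmpty)) k := by
  have h : (nl.filter (fun v => !v.isEmpty)).filter (fun v => !v.isEmpty)
      = nl.filter (fun v => !v.isEmpty) :=
    pvFilter_self _ (fun v hv => by have := List.of_mem_filter hv; simpa using this)
  rw [pvKernA.eq_def, pvKernA.eq_def (nums_list := nl.filter (fun v => !v.isEmpty))]
  split <;> rename_i heq
  all_goals (rw [← h] at heq)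
  · split <;> rename_i heq2
    · rfl
    · rw [heq] at heq2; exact absurd heq2 (by simp)
    · rw [heq] at heq2; exact absurd heq2 (by simp)
  · split <;> rename_i heq2 <;> rw [heq] at heq2
    · exact absurd heq2 (by simp)
    · obtain ⟨h1, -⟩ := List.cons_eq_cons.mp heq2.symm; rw [h1]
    · exact absurd heq2 (by simp)
  · split <;> rename_i heq2 <;> rw [heq] at heq2
    · exact absurd heq2 (by simp)
    · exact absurd heq2.symm (by simp)
    · obtain ⟨h1, h2⟩ := List.cons_eq_cons.mp heq2.symm
      obtain ⟨h3, h4⟩ := List.cons_eq_cons.mp h2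
      rw [h1, h3, h4]

-- ===== VERDICT (by name: the statement is the Claim_ definition above) =====
theorem kSmallestTuples_spec : Claim_equal_kSmallestTuples := by
  intro nums_list k _
  unfold Spec_kSmallestTuples kSmallestTuples kSmallestTuples_alt
  rw [pvKernA_filter]
  by_cases hemp : (nums_list.filter (fun v => !v.isEmpty)).isEmpty
  · rw [if_pos hemp]
    have hnil : (nums_list.filter (fun v => !v.isEmpty)) = [] := List.isEmpty_iff.mp hemp
    rw [hnil]
    rw [pvKernA.eq_def]
    simp
  · rw [if_neg hemp]
    rw [pvKernA_eq_fold k _ (by simpa [List.isEmpty_iff] using hemp)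
      (fun v hv => by have := List.of_mem_filter hv; simpa using this)]
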